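-- pv_equiv track=rewrite | github.com/sevenhe716/LeetCode | Contests/c084.py | largestOverlap1
-- ===== SOURCE A (Python) =====
-- def largestOverlap1(A, B):
--     """
--     :type A: List[List[int]]
--     :type B: List[List[int]]
--     :rtype: int
--     """
--
--     if not A:
--         return 0
--
--     row_count = len(A[0])
--     col_count = len(A)
--     max_count = 0
--
--     for i in range(row_count):
--         for row in A:
--             head = row[0]
--             for row_i in range(1, row_count):
--                 row[row_i - 1] = row[row_i]
--             row[-1] = head
--
--         for j in range(col_count):
--             head_row = A[0]
--             for col_i in range(1, col_count):
--                 A[col_i - 1] = A[col_i]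
--             A[-1] = head_row
--
--             # Check(A, B)
--             count = 0
--
--             for r in range(row_count):
--                 for c in range(col_count):
--                     if A[c][r] + B[c][r] == 2:
--                         count += 1
--
--             if count > max_count:
--                 max_count = count
--
--     return max_count
-- ===== SOURCE B (Python) =====
-- def largestOverlap1(A, B):
--     """
--     :type A: List[List[int]]
--     :type B: List[List[int]]
--     :rtype: int
--     """
--     if not A:
--         return 0
--     row_count = len(A[0])
--     col_count = len(A)
--     # index B's cells by value, so each A cell is paired only with the B cells
--     # that can complete a sum of 2
--     bpos = {}
--     for c in range(col_count):
--         for r in range(row_count):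
--             bpos.setdefault(B[c][r], []).append((c, r))
--     offs = {}
--     for c in range(col_count):
--         for r in range(row_count):
--             for (bc, br) in bpos.get(2 - A[c][r], ()):
--                 key = ((bc - c) % col_count, (br - r) % row_count)
--                 offs[key] = offs.get(key, 0) + 1
--     return max(offs.values(), default=0)
-- ===== Notes on version B (the rewrite author's own statement) =====
-- stated objective: faster
-- what changed: Instead of materialising every cyclic shift of A by in-place rotations and rescanning the whole grid per shift, B buckets B's cells by value, pairs each A cell only with B cells of the complementary value (sum 2), tallies each pair's cyclic offset in a dictionary, and returns the largest tally (0 if none).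
import Mathlib
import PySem

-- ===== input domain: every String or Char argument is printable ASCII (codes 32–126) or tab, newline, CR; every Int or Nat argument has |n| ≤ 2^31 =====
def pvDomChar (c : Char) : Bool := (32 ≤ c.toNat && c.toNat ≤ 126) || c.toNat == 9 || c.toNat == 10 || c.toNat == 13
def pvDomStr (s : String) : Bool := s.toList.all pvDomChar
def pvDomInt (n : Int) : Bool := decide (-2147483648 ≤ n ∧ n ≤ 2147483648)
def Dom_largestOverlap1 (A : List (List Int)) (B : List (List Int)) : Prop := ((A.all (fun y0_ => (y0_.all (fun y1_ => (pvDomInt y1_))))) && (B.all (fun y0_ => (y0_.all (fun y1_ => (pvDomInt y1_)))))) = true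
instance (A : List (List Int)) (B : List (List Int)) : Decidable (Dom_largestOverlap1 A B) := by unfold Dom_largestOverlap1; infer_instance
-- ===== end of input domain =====

-- B replaces A's shift-and-rescan over all cyclic shifts by one pass that tallies, in a
-- dictionary, the cyclic offset of every pair of cells summing to 2 (pairing each A cell only
-- with B cells of the complementary value via a value index) and returns the largest tally.
-- A mutates its argument A in place (the rotations); the equivalence proved here is about the
-- return value only (A's list is restored by the time it returns, but intermediate states differ).


-- ===== PORT A =====
-- Python's in-place left-shift-by-one pattern: head = xs[0]; for i in range(1, n): xs[i-1] = xs[i]; xs[-1] = head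
def pvShift1 {α : Type} (d : α) (n : Int) (xs : List α) : List α :=
  let head := PySem.List.pyGetD xs 0 d
  let xs := (PySem.List.pyRange 1 n 1).foldl
    (fun ys i => PySem.List.pySetD ys (i - 1) (PySem.List.pyGetD ys i d)) xs
  PySem.List.pySetD xs (-1) head

-- the Check(A, B) count loop of A
def pvCountA (B : List (List Int)) (rowCount colCount : Int) (M : List (List Int)) : Int :=
  (PySem.List.pyRange 0 rowCount 1).foldl (fun cnt r =>
    (PySem.List.pyRange 0 colCount 1).foldl (fun cnt c =>
      if PySem.List.pyGetD (PySem.List.pyGetD M c []) r 0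
         + PySem.List.pyGetD (PySem.List.pyGetD B c []) r 0 = 2 then cnt + 1 else cnt) cnt) 0

def largestOverlap1 (A : List (List Int)) (B : List (List Int)) : Int :=
  if A = [] then 0
  else
    let rowCount : Int := PySem.List.len (PySem.List.pyGetD A 0 [])
    let colCount : Int := PySem.List.len A
    let st :=
      (PySem.List.pyRange 0 rowCount 1).foldl (fun (st : List (List Int) × Int) _i =>
        let A1 := st.1.map (fun row => pvShift1 (0 : Int) rowCount row)
        (PySem.List.pyRange 0 colCount 1).foldl (fun (st2 : List (List Int) × Int) _j =>
          let A2 := pvShift1 ([] : List Int) colCount st2.1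
          let count := pvCountA B rowCount colCount A2
          (A2, if count > st2.2 then count else st2.2)) (A1, st.2)) (A, 0)
    st.2

-- ===== PORT B =====
def largestOverlap1_alt (A : List (List Int)) (B : List (List Int)) : Int :=
  if A = [] then 0
  else
    let rowCount : Int := PySem.List.len (PySem.List.pyGetD A 0 [])
    let colCount : Int := PySem.List.len A
    let bpos : PySem.Dict Int (List (Int × Int)) :=
      (PySem.List.pyRange 0 colCount 1).foldl (fun d c =>
        (PySem.List.pyRange 0 rowCount 1).foldl (fun d r =>
          d.modify (PySem.List.pyGetD (PySem.List.pyGetD B c []) r 0) [] (· ++ [(c, r)])) d)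
        PySem.Dict.empty
    let offs : PySem.Dict (Int × Int) Int :=
      (PySem.List.pyRange 0 colCount 1).foldl (fun d c =>
        (PySem.List.pyRange 0 rowCount 1).foldl (fun d r =>
          (bpos.getD (2 - PySem.List.pyGetD (PySem.List.pyGetD A c []) r 0) []).foldl (fun d q =>
            let key := (PySem.Int.mod (q.1 - c) colCount, PySem.Int.mod (q.2 - r) rowCount)
            d.insert key (d.getD key 0 + 1)) d) d)
        PySem.Dict.empty
    match PySem.List.max? offs.values (fun v => v) with
    | none => 0
    | some v => v

-- ===== PRECONDITION & SPEC =====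
-- Pre_ restricts to the function's natural domain: A rectangular and B at least covering A's
-- extent (otherwise Python raises IndexError, or — when a row of A is LONGER than A[0] — the
-- in-place shifts scramble the matrix; matrices are the task's intended inputs); when A[0] is
-- empty A touches nothing and returns 0, so any shapes are admitted then.
def Pre_largestOverlap1 (A : List (List Int)) (B : List (List Int)) : Prop :=
  (A.headD []).length = 0 ∨
    ((∀ row ∈ A, row.length = (A.headD []).length) ∧ A.length ≤ B.length ∧
      ∀ c < A.length, (A.headD []).length ≤ (B.getD c []).length)
instance (A : List (List Int)) (B : List (List Int)) : Decidable (Pre_largestOverlap1 A B) := by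
  unfold Pre_largestOverlap1; infer_instance

def pvWitness_largestOverlap1 : List (List Int) × List (List Int) :=
  ([[1, 0], [0, 1]], [[1, 1], [0, 1]])

def Spec_largestOverlap1 (A : List (List Int)) (B : List (List Int)) (out : Int) : Prop := out = largestOverlap1_alt A B
instance (A : List (List Int)) (B : List (List Int)) (out : Int) : Decidable (Spec_largestOverlap1 A B out) := by unfold Spec_largestOverlap1; infer_instance

-- ===== CLAIM (what is proved, stated in full; the proofs are below) =====
def Claim_equal_largestOverlap1 : Prop := ∀ (A : List (List Int)) (B : List (List Int)), Dom_largestOverlap1 A B → Pre_largestOverlap1 A B → Spec_largestOverlap1 A B (largestOverlap1 A B)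

-- ===== LEMMAS AND PROOFS =====

-- cell value read with default 0 (both ports read cells this way)
def avalM (M : List (List Int)) (c r : Nat) : Int := (M.getD c []).getD r 0

-- the matrix after i row-shifts and k column-shifts of a rectangular cc x rc matrix A
def matAB (A : List (List Int)) (cc rc i k : Nat) : List (List Int) :=
  (List.range cc).map (fun c => (List.range rc).map (fun r => avalM A ((c + k) % cc) ((r + i) % rc)))

-- the overlap count A computes at shift (i, k)
def nCount (A B : List (List Int)) (cc rc i k : Nat) : Int :=
  ((List.range rc).map (fun r => ((List.range cc).countP (fun c =>
    decide (avalM A ((c + k) % cc) ((r + i) % rc) + avalM B c r = 2)) : Int))).sum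

-- B's dictionary key for the pair (A cell (pc,pr), B cell (qc,qr)), as the Int pair B stores
def keyI (cc rc pc pr qc qr : Nat) : Int × Int :=
  ((((cc + qc - pc) % cc : Nat) : Int), (((rc + qr - pr) % rc : Nat) : Int))

-- the key corresponding to shift (i, k)
def keyOf (cc rc i k : Nat) : Int × Int :=
  ((((cc - k % cc) % cc : Nat) : Int), (((rc - i % rc) % rc : Nat) : Int))

-- number of cell pairs with a given key whose values sum to 2
def pCount (A B : List (List Int)) (cc rc : Nat) (kk : Int × Int) : Nat :=
  ∑ qc ∈ Finset.range cc, ∑ qr ∈ Finset.range rc, ∑ pc ∈ Finset.range cc, ∑ pr ∈ Finset.range rc,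
    if avalM A pc pr + avalM B qc qr = 2 ∧ keyI cc rc pc pr qc qr = kk then 1 else 0

-- the counts examined by A's inner loop, resp. by its whole double loop
def innerVals (A B : List (List Int)) (cc rc i : Nat) : Nat → Nat → List Int
  | _, 0 => []
  | k, n+1 => nCount A B cc rc i (k+1) :: innerVals A B cc rc i (k+1) n

def outerVals (A B : List (List Int)) (cc rc : Nat) : Nat → Nat → Nat → List Int
  | _, _, 0 => []
  | i, k, n+1 => innerVals A B cc rc (i+1) k cc ++ outerVals A B cc rc (i+1) (k+cc) n

-- B's flat list of cell coordinates and its flat list of tallied keys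
def pairsI (cc rc : Nat) : List (Int × Int) :=
  (List.range cc).flatMap (fun (c : Nat) => (List.range rc).map (fun (r : Nat) => ((c : Int), (r : Int))))

def bvalP (B : List (List Int)) (q : Int × Int) : Int :=
  PySem.List.pyGetD (PySem.List.pyGetD B q.1 []) q.2 0

def keyFun (cc rc : Nat) (p q : Int × Int) : Int × Int :=
  (PySem.Int.mod (q.1 - p.1) (cc : Int), PySem.Int.mod (q.2 - p.2) (rc : Int))

def flatKeys (A B : List (List Int)) (cc rc : Nat) : List (Int × Int) :=
  (pairsI cc rc).flatMap (fun p =>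
    (((pairsI cc rc).filter (fun q => bvalP B q == 2 - bvalP A p)).map (fun q => keyFun cc rc p q)))

-- ---- small arithmetic helpers ----
lemma mod_small2 (x n : Nat) (h : x < 2 * n) : x % n = if x < n then x else x - n := by
  split
  · exact Nat.mod_eq_of_lt (by omega)
  · rw [Nat.mod_eq_sub_mod (by omega)]; exact Nat.mod_eq_of_lt (by omega)

lemma key_shift' (cc c t : Nat) (hc : c < cc) (ht : t < cc) :
    (cc + c - (c + t) % cc) % cc = (cc - t) % cc := by
  rw [mod_small2 (c + t) cc (by omega)]
  by_cases h : c + t < cc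
  · rw [if_pos h]
    have e : cc + c - (c + t) = cc - t := by omega
    rw [e]
  · rw [if_neg h]
    have e : cc + c - (c + t - cc) = cc + (cc - t) := by omega
    rw [e, Nat.add_mod_left]

lemma add_mod_mod (c k n : Nat) : (c + k) % n = (c + k % n) % n := by
  conv_lhs => rw [Nat.add_mod]
  conv_rhs => rw [Nat.add_mod]
  rw [Nat.mod_mod_of_dvd _ dvd_rfl]

lemma key_shift (cc : Nat) (hcc : 0 < cc) (c k : Nat) (hc : c < cc) :
    (cc + c - (c + k) % cc) % cc = (cc - k % cc) % cc := by
  rw [add_mod_mod c k cc]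
  exact key_shift' cc c (k % cc) hc (Nat.mod_lt _ hcc)

lemma key_shift_inv (cc : Nat) (hcc : 0 < cc) (p q k : Nat) (hp : p < cc) (hq : q < cc)
    (h : (cc + q - p) % cc = (cc - k % cc) % cc) : p = (q + k) % cc := by
  have ht : k % cc < cc := Nat.mod_lt _ hcc
  rw [mod_small2 (cc + q - p) cc (by omega), mod_small2 (cc - k % cc) cc (by omega)] at h
  rw [add_mod_mod q k cc, mod_small2 (q + k % cc) cc (by omega)]
  split at h <;> split at h <;> split <;> omega

lemma key_surj (cc x : Nat) (hcc : 0 < cc) (hx : x < cc) :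
    (cc - ((cc - x) % cc) % cc) % cc = x := by
  rw [Nat.mod_mod_of_dvd _ dvd_rfl, mod_small2 (cc - x) cc (by omega)]
  split <;> rw [mod_small2 _ cc (by omega)] <;> split <;> omega

lemma succ_mod_pred (n i : Nat) (hn : 0 < n) (hi : i < n) : ((i + n - 1) % n + 1) % n = i := by
  rw [mod_small2 (i + n - 1) n (by omega)]
  split <;> rw [mod_small2 _ n (by omega)] <;> split <;> omega

lemma ifmax (m x : Int) : (if x > m then x else m) = max m x := by
  rw [max_def]; split_ifs <;> omega

-- ---- glue: list counts as Finset sums ----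
lemma countP_range_sum (n : Nat) (p : Nat → Bool) :
    (List.range n).countP p = ∑ x ∈ Finset.range n, if p x then 1 else 0 := by
  induction n with
  | zero => simp
  | succ m ih => rw [List.range_succ, List.countP_append, Finset.sum_range_succ, ih]; simp [List.countP_cons]

lemma sum_map_range_int (n : Nat) (f : Nat → Int) :
    ((List.range n).map f).sum = ∑ x ∈ Finset.range n, f x := by
  induction n with
  | zero => simp
  | succ m ih => rw [List.range_succ, List.map_append, List.sum_append, Finset.sum_range_succ, ih]; simp

lemma countP_flatMap {α β : Type} (l : List α) (g : α → List β) (p : β → Bool) :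
    (l.flatMap g).countP p = (l.map (fun a => (g a).countP p)).sum := by
  induction l with
  | nil => simp
  | cons x t ih => simp [List.flatMap_cons, List.countP_append, ih]

lemma map_sum_flatMap {α β : Type} (l : List α) (g : α → List β) (f : β → Nat) :
    ((l.flatMap g).map f).sum = (l.map (fun a => ((g a).map f).sum)).sum := by
  induction l with
  | nil => simp
  | cons x t ih => simp [List.flatMap_cons, ih]

lemma sum_swap4 {M : Type} [AddCommMonoid M] (s t u v : Finset Nat) (f : Nat → Nat → Nat → Nat → M) :
    (∑ a ∈ s, ∑ b ∈ t, ∑ c ∈ u, ∑ d ∈ v, f a b c d)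
      = ∑ c ∈ u, ∑ d ∈ v, ∑ a ∈ s, ∑ b ∈ t, f a b c d := by
  calc (∑ a ∈ s, ∑ b ∈ t, ∑ c ∈ u, ∑ d ∈ v, f a b c d)
      = ∑ a ∈ s, ∑ c ∈ u, ∑ b ∈ t, ∑ d ∈ v, f a b c d :=
        Finset.sum_congr rfl (fun a _ => Finset.sum_comm)
    _ = ∑ c ∈ u, ∑ a ∈ s, ∑ b ∈ t, ∑ d ∈ v, f a b c d := Finset.sum_comm
    _ = ∑ c ∈ u, ∑ a ∈ s, ∑ d ∈ v, ∑ b ∈ t, f a b c d :=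
        Finset.sum_congr rfl (fun c _ => Finset.sum_congr rfl (fun a _ => Finset.sum_comm))
    _ = ∑ c ∈ u, ∑ d ∈ v, ∑ a ∈ s, ∑ b ∈ t, f a b c d :=
        Finset.sum_congr rfl (fun c _ => Finset.sum_comm)

-- ---- the in-place shift rotates ----
lemma pySetD_last {α : Type} (t : List α) (z v : α) :
    PySem.List.pySetD (t ++ [z]) (-1) v = t ++ [v] := by
  simp [PySem.List.pySetD, PySem.List.pySet?, PySem.List.pyIdx?]

lemma shiftLoop {α : Type} (d : α) (xs : List α) (m : Nat) (hm : m < xs.length) :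
    (List.range m).foldl (fun ys k => ys.set k (ys.getD (k+1) d)) xs
      = xs.tail.take m ++ xs.drop m := by
  induction m with
  | zero => simp
  | succ j ih =>
    rw [List.range_succ, List.foldl_append, ih (by omega), List.foldl_cons, List.foldl_nil]
    have hlt : (xs.tail.take j).length = j := by
      simp [List.length_tail]; omega
    have hget : (xs.tail.take j ++ xs.drop j).getD (j+1) d = xs[j+1]'(by omega) := by
      rw [List.getD_eq_getElem _ _ (by simp [List.length_tail]; omega), List.getElem_append]
      split
      · next h => exfalso; simp only [List.length_take, List.length_tail] at h; omega
      · rw [List.getElem_drop]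
        congr 1
        omega
    rw [hget]
    apply List.ext_getElem
    · simp [List.length_tail]; omega
    · intro n h1 h2
      rw [List.getElem_set]
      by_cases hjn : j = n
      · subst hjn
        rw [if_pos rfl, List.getElem_append,]
        split
        · rw [List.getElem_take, List.getElem_tail]
        · next h => exfalso; simp [List.length_tail] at h; omega
      · rw [if_neg hjn, List.getElem_append, List.getElem_append]
        by_cases hn : n < j
        · rw [dif_pos (by omega : n < (xs.tail.take j).length),
            dif_pos (by simp [List.length_tail] at *; omega : n < (xs.tail.take (j+1)).length)]
          rw [List.getElem_take, List.getElem_take]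
        · rw [dif_neg (by omega : ¬ n < (xs.tail.take j).length),
            dif_neg (by simp [List.length_tail] at *; omega : ¬ n < (xs.tail.take (j+1)).length)]
          rw [List.getElem_drop, List.getElem_drop]
          congr 1
          simp [List.length_tail] at *
          omega

lemma pvShift1_rot {α : Type} (d : α) (xs : List α) (hx : xs ≠ []) :
    pvShift1 d (xs.length : Int) xs = xs.tail ++ [xs.headD d] := by
  obtain ⟨a, t, rfl⟩ := List.exists_cons_of_ne_nil hx
  unfold pvShift1
  rw [PySem.List.pyGetD_zero_cons, PySem.List.pyRange_one]
  have hm : (((a :: t).length : Int) - 1).toNat = t.length := by simp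
  rw [hm, List.foldl_map]
  have e1 : ∀ k : Nat, (1 : Int) + (k : Int) - 1 = ((k : Nat) : Int) := by intro k; ring
  have e2 : ∀ k : Nat, (1 : Int) + (k : Int) = (((k + 1 : Nat) : Nat) : Int) := by
    intro k; push_cast; ring
  simp only [e2]
  have e3 : ∀ k : Nat, (((k + 1 : Nat) : Int)) - 1 = ((k : Nat) : Int) := by
    intro k; push_cast; ring
  simp only [e3, PySem.List.pySetD_natCast, PySem.List.pyGetD_natCast]
  have hloop := shiftLoop d (a :: t) t.length (by simp)
  rw [hloop]
  have htail : (a :: t).tail = t := rfl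
  rw [htail, List.take_length]
  have hdrop : ((a :: t).drop t.length).length = 1 := by simp
  obtain ⟨z, hz⟩ := List.length_eq_one_iff.mp hdrop
  rw [hz, pySetD_last]
  simp

-- ---- matAB lemmas ----
lemma aval_mat (A : List (List Int)) (cc rc i k c r : Nat) (hc : c < cc) (hr : r < rc) :
    avalM (matAB A cc rc i k) c r = avalM A ((c + k) % cc) ((r + i) % rc) := by
  show ((matAB A cc rc i k).getD c []).getD r 0 = avalM A ((c + k) % cc) ((r + i) % rc)
  have h1 : (matAB A cc rc i k).getD c []
      = (List.range rc).map (fun r => avalM A ((c + k) % cc) ((r + i) % rc)) := by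
    unfold matAB
    rw [List.getD_eq_getElem _ _ (by simpa using hc), List.getElem_map, List.getElem_range]
  rw [h1, List.getD_eq_getElem _ _ (by simpa using hr), List.getElem_map, List.getElem_range]

lemma headD_map_range {α : Type} (n : Nat) (hn : 0 < n) (g : Nat → α) (d : α) :
    ((List.range n).map g).headD d = g 0 := by
  obtain ⟨m, rfl⟩ : ∃ m, n = m + 1 := ⟨n - 1, by omega⟩
  rw [List.range_succ_eq_map]
  simp

lemma rot_map_range {α : Type} (n : Nat) (hn : 0 < n) (f : Nat → α) :
    ((List.range n).map f).tail ++ [f 0] = (List.range n).map (fun r => f ((r + 1) % n)) := by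
  apply List.ext_getElem
  · simp; omega
  · intro j h1 h2
    simp only [List.getElem_append, List.getElem_map, List.getElem_range, List.length_tail,
      List.length_map, List.length_range]
    split
    · rw [List.getElem_tail, List.getElem_map, List.getElem_range]
      congr 1
      rw [Nat.mod_eq_of_lt (by simp at h1 ⊢; omega)]
    · have hj : j = n - 1 := by simp at h1 h2 ⊢; omega
      subst hj
      have e : (n - 1 + 1) % n = 0 := by rw [Nat.sub_add_cancel hn, Nat.mod_self]
      simp [e]

lemma mat_zero (A : List (List Int)) (cc rc : Nat) (hcc : A.length = cc)
    (hrect : ∀ row ∈ A, row.length = rc) : matAB A cc rc 0 0 = A := by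
  apply List.ext_getElem
  · simp [matAB, hcc]
  · intro c h1 h2
    unfold matAB
    have hclt : c < cc := by omega
    simp only [List.getElem_map, List.getElem_range]
    have hrow : A[c].length = rc := hrect A[c] (List.getElem_mem h2)
    apply List.ext_getElem
    · simp [hrow]
    · intro r hr1 hr2
      have hrlt : r < rc := by simpa using hr1
      simp only [List.getElem_map, List.getElem_range]
      unfold avalM
      rw [Nat.add_zero, Nat.mod_eq_of_lt hclt, Nat.add_zero, Nat.mod_eq_of_lt hrlt]
      have hgc : A.getD c [] = A[c] := List.getD_eq_getElem A [] h2
      rw [hgc]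
      exact List.getD_eq_getElem A[c] 0 (by omega)

lemma mat_rowshift (A : List (List Int)) (cc rc i k : Nat) (hrc : 0 < rc) :
    (matAB A cc rc i k).map (fun row => pvShift1 (0 : Int) (rc : Int) row) = matAB A cc rc (i+1) k := by
  unfold matAB
  rw [List.map_map]
  apply List.map_congr_left
  intro c _
  simp only [Function.comp_apply]
  have hlen : ((List.range rc).map (fun r => avalM A ((c + k) % cc) ((r + i) % rc))).length = rc := by simp
  rw [show (rc : Int) = (((List.range rc).map (fun r => avalM A ((c + k) % cc) ((r + i) % rc))).length : Int) by rw [hlen]]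
  rw [pvShift1_rot _ _ (by simp; omega)]
  rw [headD_map_range rc hrc _ _, rot_map_range rc hrc _]
  apply List.map_congr_left
  intro r _
  have e : ((r + 1) % rc + i) % rc = (r + (i + 1)) % rc := by
    rw [Nat.mod_add_mod]
    congr 1
    omega
  rw [e]

lemma mat_colshift (A : List (List Int)) (cc rc i k : Nat) (hcc : 0 < cc) :
    pvShift1 ([] : List Int) (cc : Int) (matAB A cc rc i k) = matAB A cc rc i (k+1) := by
  unfold matAB
  have hlen : ((List.range cc).map (fun c => (List.range rc).map (fun r => avalM A ((c + k) % cc) ((r + i) % rc)))).length = cc := by simp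
  rw [show (cc : Int) = (((List.range cc).map (fun c => (List.range rc).map (fun r => avalM A ((c + k) % cc) ((r + i) % rc)))).length : Int) by rw [hlen]]
  rw [pvShift1_rot _ _ (by simp; omega)]
  rw [headD_map_range cc hcc _ _, rot_map_range cc hcc _]
  apply List.map_congr_left
  intro c _
  have e : ((c + 1) % cc + k) % cc = (c + (k + 1)) % cc := by
    rw [Nat.mod_add_mod]
    congr 1
    omega
  rw [e]

-- ---- A's count loop computes nCount ----
lemma count_mat (A B : List (List Int)) (cc rc i k : Nat) :
    pvCountA B (rc : Int) (cc : Int) (matAB A cc rc i k) = nCount A B cc rc i k := by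
  unfold pvCountA nCount
  simp only [PySem.List.pyRange_zero_nat, List.foldl_map, PySem.List.pyGetD_natCast,
    PySem.List.foldl_ite_add_one, PySem.List.foldl_add, zero_add]
  congr 1
  apply List.map_congr_left
  intro r hr
  congr 1
  apply List.countP_congr
  intro c hc
  simp only [decide_eq_true_eq]
  show avalM (matAB A cc rc i k) c r + avalM B c r = 2 ↔ _
  rw [aval_mat A cc rc i k c r (List.mem_range.mp hc) (List.mem_range.mp hr)]

-- ---- loop invariants for A ----
lemma innerLoop (A B : List (List Int)) (cc rc : Nat) (hcc : 0 < cc)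
    (l : List Int) (i k : Nat) (m : Int) :
    l.foldl (fun (st2 : List (List Int) × Int) _j =>
      let A2 := pvShift1 ([] : List Int) (cc : Int) st2.1
      let count := pvCountA B (rc : Int) (cc : Int) A2
      (A2, if count > st2.2 then count else st2.2)) (matAB A cc rc i k, m)
    = (matAB A cc rc i (k + l.length),
       List.foldl max m (innerVals A B cc rc i k l.length)) := by
  induction l generalizing k m with
  | nil => simp [innerVals]
  | cons x t ih =>
    rw [List.foldl_cons]
    have hstep : (let A2 := pvShift1 ([] : List Int) (cc : Int) ((matAB A cc rc i k, m) : List (List Int) × Int).1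
        let count := pvCountA B (rc : Int) (cc : Int) A2
        (A2, if count > ((matAB A cc rc i k, m) : List (List Int) × Int).2 then count
          else ((matAB A cc rc i k, m) : List (List Int) × Int).2))
        = (matAB A cc rc i (k+1), max m (nCount A B cc rc i (k+1))) := by
      show (pvShift1 ([] : List Int) (cc : Int) (matAB A cc rc i k),
        if pvCountA B (rc : Int) (cc : Int) (pvShift1 ([] : List Int) (cc : Int) (matAB A cc rc i k)) > m
        then pvCountA B (rc : Int) (cc : Int) (pvShift1 ([] : List Int) (cc : Int) (matAB A cc rc i k))
        else m) = _
      rw [mat_colshift A cc rc i k hcc, count_mat, ifmax]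
    rw [hstep, ih (k+1) (max m (nCount A B cc rc i (k+1)))]
    simp only [List.length_cons, innerVals, List.foldl_cons]
    rw [show k + 1 + t.length = k + (t.length + 1) by omega]

lemma outerLoop (A B : List (List Int)) (cc rc : Nat) (hcc : 0 < cc) (hrc : 0 < rc)
    (l : List Int) (i k : Nat) (m : Int) :
    l.foldl (fun (st : List (List Int) × Int) _i =>
      let A1 := st.1.map (fun row => pvShift1 (0 : Int) (rc : Int) row)
      (PySem.List.pyRange 0 (cc : Int) 1).foldl (fun (st2 : List (List Int) × Int) _j =>
        let A2 := pvShift1 ([] : List Int) (cc : Int) st2.1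
        let count := pvCountA B (rc : Int) (cc : Int) A2
        (A2, if count > st2.2 then count else st2.2)) (A1, st.2)) (matAB A cc rc i k, m)
    = (matAB A cc rc (i + l.length) (k + l.length * cc),
       List.foldl max m (outerVals A B cc rc i k l.length)) := by
  induction l generalizing i k m with
  | nil => simp [outerVals]
  | cons x t ih =>
    rw [List.foldl_cons]
    have hlen : (PySem.List.pyRange 0 (cc : Int) 1).length = cc := by
      rw [PySem.List.pyRange_zero_nat]; simp
    have hstep : (let A1 := ((matAB A cc rc i k, m) : List (List Int) × Int).1.map (fun row => pvShift1 (0 : Int) (rc : Int) row)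
        (PySem.List.pyRange 0 (cc : Int) 1).foldl (fun (st2 : List (List Int) × Int) _j =>
          let A2 := pvShift1 ([] : List Int) (cc : Int) st2.1
          let count := pvCountA B (rc : Int) (cc : Int) A2
          (A2, if count > st2.2 then count else st2.2)) (A1, ((matAB A cc rc i k, m) : List (List Int) × Int).2))
        = (matAB A cc rc (i+1) (k + cc), List.foldl max m (innerVals A B cc rc (i+1) k cc)) := by
      show (PySem.List.pyRange 0 (cc : Int) 1).foldl _
        ((matAB A cc rc i k).map (fun row => pvShift1 (0 : Int) (rc : Int) row), m) = _
      rw [mat_rowshift A cc rc i k hrc]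
      rw [innerLoop A B cc rc hcc _ (i+1) k m, hlen]
    rw [hstep, ih (i+1) (k+cc) (List.foldl max m (innerVals A B cc rc (i+1) k cc))]
    simp only [List.length_cons, outerVals, List.foldl_append]
    rw [show i + 1 + t.length = i + (t.length + 1) by omega,
        show k + cc + t.length * cc = k + (t.length + 1) * cc by ring]

-- ---- membership in the examined-value lists ----
lemma mem_innerVals (A B : List (List Int)) (cc rc i : Nat) (x : Int) :
    ∀ (n k : Nat), (x ∈ innerVals A B cc rc i k n ↔ ∃ j < n, x = nCount A B cc rc i (k+j+1)) := by
  intro n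
  induction n with
  | zero => intro k; simp [innerVals]
  | succ p ih =>
    intro k
    simp only [innerVals, List.mem_cons, ih (k+1)]
    constructor
    · rintro (rfl | ⟨j, hj, rfl⟩)
      · exact ⟨0, by omega, by ring_nf⟩
      · exact ⟨j+1, by omega, by ring_nf⟩
    · rintro ⟨j, hj, rfl⟩
      match j with
      | 0 => left; ring_nf
      | j'+1 => right; exact ⟨j', by omega, by ring_nf⟩

lemma mem_outerVals (A B : List (List Int)) (cc rc : Nat) (x : Int) :
    ∀ (n i k : Nat), (x ∈ outerVals A B cc rc i k n ↔
      ∃ a < n, ∃ j < cc, x = nCount A B cc rc (i+a+1) (k + a*cc + j + 1)) := by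
  intro n
  induction n with
  | zero => intro i k; simp [outerVals]
  | succ p ih =>
    intro i k
    simp only [outerVals, List.mem_append, ih (i+1) (k+cc), mem_innerVals]
    constructor
    · rintro (⟨j, hj, rfl⟩ | ⟨a, ha, j, hj, rfl⟩)
      · exact ⟨0, by omega, j, hj, by ring_nf⟩
      · refine ⟨a+1, by omega, j, hj, ?_⟩; congr 1 <;> ring
    · rintro ⟨a, ha, j, hj, rfl⟩
      match a with
      | 0 => left; exact ⟨j, hj, by ring_nf⟩
      | a'+1 => right; refine ⟨a', by omega, j, hj, ?_⟩; congr 1 <;> ring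

-- ---- mod-periodicity ----
lemma nCount_mod (A B : List (List Int)) (cc rc : Nat) (i k : Nat) :
    nCount A B cc rc i k = nCount A B cc rc (i % rc) (k % cc) := by
  unfold nCount
  have hmod : ∀ (a b n : Nat), (a + b) % n = (a + b % n) % n := by
    intro a b n
    conv_lhs => rw [Nat.add_mod]
    conv_rhs => rw [Nat.add_mod]
    rw [Nat.mod_mod_of_dvd _ dvd_rfl]
  congr 1
  apply List.map_congr_left
  intro r _
  congr 1
  apply List.countP_congr
  intro c _
  rw [hmod c k, hmod r i]

-- ---- more glue ----
lemma sum_map_range_nat (n : Nat) (f : Nat → Nat) :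
    ((List.range n).map f).sum = ∑ x ∈ Finset.range n, f x := by
  induction n with
  | zero => simp
  | succ m ih => rw [List.range_succ, List.map_append, List.sum_append, Finset.sum_range_succ, ih]; simp

lemma modInt_eq (cc pc qc : Nat) (hcc : 0 < cc) (hp : pc < cc) :
    PySem.Int.mod ((qc : Int) - (pc : Int)) (cc : Int) = (((cc + qc - pc) % cc : Nat) : Int) := by
  rw [PySem.Int.mod_eq_emod_of_pos (by exact_mod_cast hcc)]
  have hle : pc ≤ cc + qc := by omega
  have e : (qc : Int) - (pc : Int) = ((cc + qc - pc : Nat) : Int) - ((cc : Nat) : Int) := by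
    push_cast [hle]
    ring
  rw [e, Int.sub_emod_right]
  exact_mod_cast (Int.natCast_mod (cc + qc - pc) cc).symm

lemma mem_pairsI (cc rc : Nat) (p : Int × Int) :
    p ∈ pairsI cc rc ↔ ∃ c < cc, ∃ r < rc, p = ((c : Int), (r : Int)) := by
  constructor
  · intro hp
    unfold pairsI at hp
    rw [List.mem_flatMap] at hp
    obtain ⟨c, hc, hp2⟩ := hp
    rw [List.mem_map] at hp2
    obtain ⟨r, hr, rfl⟩ := hp2
    exact ⟨c, List.mem_range.mp hc, r, List.mem_range.mp hr, rfl⟩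
  · rintro ⟨c, hc, r, hr, rfl⟩
    unfold pairsI
    rw [List.mem_flatMap]
    exact ⟨c, List.mem_range.mpr hc, List.mem_map.mpr ⟨r, List.mem_range.mpr hr, rfl⟩⟩

-- ---- the bridge: nCount at a shift equals pCount at its key ----
lemma nCount_eq_pCount (A B : List (List Int)) (cc rc : Nat) (hcc : 0 < cc) (hrc : 0 < rc)
    (i k : Nat) : nCount A B cc rc i k = (pCount A B cc rc (keyOf cc rc i k) : Int) := by
  have collapse : ∀ qc ∈ Finset.range cc, ∀ qr ∈ Finset.range rc,
      (∑ pc ∈ Finset.range cc, ∑ pr ∈ Finset.range rc,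
        if avalM A pc pr + avalM B qc qr = 2 ∧ keyI cc rc pc pr qc qr = keyOf cc rc i k
        then 1 else 0 : Nat)
      = (if avalM A ((qc + k) % cc) ((qr + i) % rc) + avalM B qc qr = 2 then 1 else 0) := by
    intro qc hqc qr hqr
    rw [Finset.mem_range] at hqc hqr
    have hiff : ∀ pc ∈ Finset.range cc, ∀ pr ∈ Finset.range rc,
        (avalM A pc pr + avalM B qc qr = 2 ∧ keyI cc rc pc pr qc qr = keyOf cc rc i k)
        ↔ (pr = (qr + i) % rc ∧ (pc = (qc + k) % cc ∧
            avalM A ((qc + k) % cc) ((qr + i) % rc) + avalM B qc qr = 2)) := by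
      intro pc hpc pr hpr
      rw [Finset.mem_range] at hpc hpr
      constructor
      · rintro ⟨hsum, hkey⟩
        unfold keyI keyOf at hkey
        rw [Prod.mk.injEq] at hkey
        have h1 : (cc + qc - pc) % cc = (cc - k % cc) % cc := Nat.cast_inj.mp hkey.1
        have h2 : (rc + qr - pr) % rc = (rc - i % rc) % rc := Nat.cast_inj.mp hkey.2
        have e1 : pc = (qc + k) % cc := key_shift_inv cc hcc pc qc k hpc hqc h1
        have e2 : pr = (qr + i) % rc := key_shift_inv rc hrc pr qr i hpr hqr h2
        refine ⟨e2, e1, ?_⟩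
        rw [← e1, ← e2]
        exact hsum
      · rintro ⟨e2, e1, hsum⟩
        subst e1
        subst e2
        refine ⟨hsum, ?_⟩
        unfold keyI keyOf
        have h1 : (cc + qc - (qc + k) % cc) % cc = (cc - k % cc) % cc := key_shift cc hcc qc k hqc
        have h2 : (rc + qr - (qr + i) % rc) % rc = (rc - i % rc) % rc := key_shift rc hrc qr i hqr
        rw [h1, h2]
    have hstep1 : (∑ pc ∈ Finset.range cc, ∑ pr ∈ Finset.range rc,
        if avalM A pc pr + avalM B qc qr = 2 ∧ keyI cc rc pc pr qc qr = keyOf cc rc i k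
        then 1 else 0 : Nat)
        = ∑ pc ∈ Finset.range cc, ∑ pr ∈ Finset.range rc,
          if pr = (qr + i) % rc ∧ (pc = (qc + k) % cc ∧
              avalM A ((qc + k) % cc) ((qr + i) % rc) + avalM B qc qr = 2) then 1 else 0 :=
      Finset.sum_congr rfl fun pc hpc => Finset.sum_congr rfl fun pr hpr =>
        if_congr (hiff pc hpc pr hpr) rfl rfl
    rw [hstep1]
    simp only [ite_and]
    have hb : (qr + i) % rc ∈ Finset.range rc := Finset.mem_range.mpr (Nat.mod_lt _ hrc)
    have ha : (qc + k) % cc ∈ Finset.range cc := Finset.mem_range.mpr (Nat.mod_lt _ hcc)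
    rw [Finset.sum_congr rfl (fun pc _ => Finset.sum_ite_eq' (Finset.range rc) ((qr + i) % rc) _)]
    simp only [hb, if_true]
    rw [Finset.sum_ite_eq' (Finset.range cc) ((qc + k) % cc) _]
    simp only [ha, if_true]
  have hR : pCount A B cc rc (keyOf cc rc i k)
      = ∑ qc ∈ Finset.range cc, ∑ qr ∈ Finset.range rc,
        (if avalM A ((qc + k) % cc) ((qr + i) % rc) + avalM B qc qr = 2 then 1 else 0 : Nat) := by
    unfold pCount
    exact Finset.sum_congr rfl fun qc hqc => Finset.sum_congr rfl fun qr hqr => collapse qc hqc qr hqr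
  rw [hR]
  unfold nCount
  rw [sum_map_range_int, ← Nat.cast_sum]
  congr 1
  rw [Finset.sum_comm]
  refine Finset.sum_congr rfl fun r _ => ?_
  rw [countP_range_sum]
  refine Finset.sum_congr rfl fun c _ => ?_
  simp

-- ---- port A equals a running max over outerVals ----
lemma portA_eq (A B : List (List Int)) (hA : A ≠ [])
    (hrect : (A.headD []).length = 0 ∨ ∀ row ∈ A, row.length = (A.headD []).length) :
    largestOverlap1 A B
      = List.foldl max 0 (outerVals A B A.length (A.headD []).length 0 0 (A.headD []).length) := by
  obtain ⟨a, t, rfl⟩ := List.exists_cons_of_ne_nil hA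
  unfold largestOverlap1
  rw [if_neg (by simp)]
  simp only [PySem.List.pyGetD_zero_cons, PySem.List.len_eq]
  by_cases hrc : a.length = 0
  · rw [show ((a :: t).headD []).length = a.length from rfl, hrc]
    rw [show ((0 : Nat) : Int) = (0 : Int) from rfl]
    rw [show PySem.List.pyRange 0 (0 : Int) 1 = [] from rfl]
    simp [outerVals]
  · have hrcpos : 0 < a.length := by omega
    have hccpos : 0 < (a :: t).length := by simp
    have hmat : ((a :: t : List (List Int)), (0 : Int))
        = (matAB (a :: t) (a :: t).length a.length 0 0, (0 : Int)) := by
      rw [mat_zero (a :: t) (a :: t).length a.length rfl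
        (by simpa using hrect.resolve_left (by simpa using hrc))]
    rw [show ((a :: t).headD []).length = a.length from rfl]
    rw [hmat, outerLoop (a :: t) B (a :: t).length a.length hccpos hrcpos
      (PySem.List.pyRange 0 (a.length : Int) 1) 0 0 0]
    rw [show (PySem.List.pyRange 0 (a.length : Int) 1).length = a.length from by
      rw [PySem.List.pyRange_zero_nat]; simp]

-- ---- port B: flattening its dictionary loops ----
lemma nestfold_dict1 (B : List (List Int)) (cc rc : Nat) :
    (List.range cc).foldl (fun d (c : Nat) => (List.range rc).foldl (fun d (r : Nat) =>
        PySem.Dict.modify d (PySem.List.pyGetD (PySem.List.pyGetD B (c : Int) []) ((r : Nat) : Int) 0) []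
          (· ++ [(((c : Nat) : Int), ((r : Nat) : Int))])) d) PySem.Dict.empty
    = ((pairsI cc rc).map (fun q => (bvalP B q, q))).foldl
        (fun d p => PySem.Dict.modify d p.1 [] (· ++ [p.2])) PySem.Dict.empty := by
  rw [List.foldl_map]
  unfold pairsI
  rw [List.foldl_flatMap]
  refine PySem.List.foldl_congr_mem _ _ _ _ ?_
  intro d c _
  rw [List.foldl_map]
  rfl

lemma bpos_getD (B : List (List Int)) (cc rc : Nat) (v : Int) :
    ((List.range cc).foldl (fun d (c : Nat) => (List.range rc).foldl (fun d (r : Nat) =>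
        PySem.Dict.modify d (PySem.List.pyGetD (PySem.List.pyGetD B (c : Int) []) ((r : Nat) : Int) 0) []
          (· ++ [(((c : Nat) : Int), ((r : Nat) : Int))])) d) PySem.Dict.empty).getD v []
    = (pairsI cc rc).filter (fun q => bvalP B q == v) := by
  rw [nestfold_dict1, PySem.Dict.getD_foldl_modify_append, PySem.Dict.getD_empty,
    List.filter_map, List.map_map]
  simp [Function.comp_def]

lemma nestfold_dict2 (A B : List (List Int)) (cc rc : Nat) :
    (List.range cc).foldl (fun d (c : Nat) => (List.range rc).foldl (fun d (r : Nat) =>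
        ((pairsI cc rc).filter (fun q => bvalP B q ==
            2 - PySem.List.pyGetD (PySem.List.pyGetD A (c : Int) []) (r : Int) 0)).foldl
          (fun d q => PySem.Dict.insert d
            (PySem.Int.mod (q.1 - (c : Int)) (cc : Int), PySem.Int.mod (q.2 - (r : Int)) (rc : Int))
            (PySem.Dict.getD d
              (PySem.Int.mod (q.1 - (c : Int)) (cc : Int), PySem.Int.mod (q.2 - (r : Int)) (rc : Int)) 0 + 1)) d) d)
      (PySem.Dict.empty : PySem.Dict (Int × Int) Int)
    = (flatKeys A B cc rc).foldl (fun d kk => PySem.Dict.insert d kk (PySem.Dict.getD d kk 0 + 1))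
        (PySem.Dict.empty : PySem.Dict (Int × Int) Int) := by
  unfold flatKeys
  rw [List.foldl_flatMap]
  unfold pairsI
  rw [List.foldl_flatMap]
  refine PySem.List.foldl_congr_mem _ _ _ _ ?_
  intro d c _
  rw [List.foldl_map]
  refine PySem.List.foldl_congr_mem _ _ _ _ ?_
  intro d' r _
  rw [List.foldl_map]
  rfl

lemma offs_values (A B : List (List Int)) (cc rc : Nat) :
    ((flatKeys A B cc rc).foldl (fun d kk => PySem.Dict.insert d kk (PySem.Dict.getD d kk 0 + 1))
        (PySem.Dict.empty : PySem.Dict (Int × Int) Int)).values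
    = (PySem.Set.ofList (flatKeys A B cc rc)).map
        (fun kk => (List.count kk (flatKeys A B cc rc) : Int)) := by
  have hnd : ((flatKeys A B cc rc).foldl
      (fun d kk => PySem.Dict.insert d kk (PySem.Dict.getD d kk 0 + 1))
      (PySem.Dict.empty : PySem.Dict (Int × Int) Int)).keys.Nodup := by
    apply PySem.Dict.nodup_keys_foldl_insert
    rw [PySem.Dict.keys_empty]
    exact List.nodup_nil
  have hkeys : ((flatKeys A B cc rc).foldl
      (fun d kk => PySem.Dict.insert d kk (PySem.Dict.getD d kk 0 + 1))
      (PySem.Dict.empty : PySem.Dict (Int × Int) Int)).keys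
      = PySem.Set.ofList (flatKeys A B cc rc) := by
    rw [PySem.Dict.keys_foldl_insert, PySem.Dict.keys_empty, PySem.Set.update_nil_left]
  have hitems := PySem.Dict.items_eq_map_keys _ hnd (0 : Int)
  show (PySem.Dict.items _).map (·.2) = _
  rw [hitems, List.map_map, hkeys]
  apply List.map_congr_left
  intro kk _
  simp only [Function.comp_apply]
  show ((flatKeys A B cc rc).foldl
      (fun d kk => PySem.Dict.insert d kk (PySem.Dict.getD d kk 0 + 1))
      (PySem.Dict.empty : PySem.Dict (Int × Int) Int)).getD kk 0 = _
  rw [PySem.Dict.getD_foldl_insert_add_one, PySem.Dict.getD_empty, zero_add]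

-- ---- port B characterization ----
lemma portB_eq (A B : List (List Int)) (hA : A ≠ []) :
    largestOverlap1_alt A B
      = (match PySem.List.max?
            ((PySem.Set.ofList (flatKeys A B A.length (A.headD []).length)).map
              (fun kk => (List.count kk (flatKeys A B A.length (A.headD []).length) : Int)))
            (fun v => v) with
         | none => 0
         | some v => v) := by
  obtain ⟨a, t, rfl⟩ := List.exists_cons_of_ne_nil hA
  unfold largestOverlap1_alt
  rw [if_neg (by simp)]
  simp only [PySem.List.pyGetD_zero_cons, PySem.List.len_eq, PySem.List.pyRange_zero_nat,
    List.foldl_map]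
  rw [show ((a :: t).headD []).length = a.length from rfl]
  simp only [bpos_getD B (a :: t).length a.length]
  rw [nestfold_dict2 (a :: t) B (a :: t).length a.length]
  rw [offs_values (a :: t) B (a :: t).length a.length]

lemma flatKeys_count (A B : List (List Int)) (cc rc : Nat) (hcc : 0 < cc) (hrc : 0 < rc)
    (kk : Int × Int) : List.count kk (flatKeys A B cc rc) = pCount A B cc rc kk := by
  rw [List.count_eq_countP]
  unfold flatKeys
  rw [countP_flatMap]
  simp only [List.countP_map, List.countP_filter]
  unfold pairsI
  rw [map_sum_flatMap]
  simp only [List.map_map, countP_flatMap, List.countP_map, Function.comp_def]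
  simp only [sum_map_range_nat, countP_range_sum]
  unfold pCount
  rw [sum_swap4]
  refine Finset.sum_congr rfl fun qc _ => Finset.sum_congr rfl fun qr _ =>
    Finset.sum_congr rfl fun pc hpc => Finset.sum_congr rfl fun pr hpr => ?_
  rw [Finset.mem_range] at hpc hpr
  have hkf : keyFun cc rc ((pc : Int), (pr : Int)) ((qc : Int), (qr : Int)) = keyI cc rc pc pr qc qr := by
    unfold keyFun keyI
    rw [modInt_eq cc pc qc hcc hpc, modInt_eq rc pr qr hrc hpr]
  have hb1 : bvalP B ((qc : Int), (qr : Int)) = avalM B qc qr := by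
    simp [bvalP, avalM]
  have hb2 : bvalP A ((pc : Int), (pr : Int)) = avalM A pc pr := by
    simp [bvalP, avalM]
  rw [hkf, hb1, hb2]
  have hiff : ((keyI cc rc pc pr qc qr == kk) && (avalM B qc qr == 2 - avalM A pc pr)) = true
      ↔ (avalM A pc pr + avalM B qc qr = 2 ∧ keyI cc rc pc pr qc qr = kk) := by
    simp only [Bool.and_eq_true, beq_iff_eq]
    constructor
    · rintro ⟨h1, h2⟩
      exact ⟨by omega, h1⟩
    · rintro ⟨h1, h2⟩
      exact ⟨h2, by omega⟩
  rw [if_congr hiff rfl rfl]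

lemma flatKeys_shape (A B : List (List Int)) (cc rc : Nat) (hcc : 0 < cc) (hrc : 0 < rc)
    (kk : Int × Int) (hk : kk ∈ flatKeys A B cc rc) :
    ∃ i < rc, ∃ k < cc, kk = keyOf cc rc i k := by
  unfold flatKeys at hk
  rw [List.mem_flatMap] at hk
  obtain ⟨p, hp, hk2⟩ := hk
  rw [List.mem_map] at hk2
  obtain ⟨q, hq, rfl⟩ := hk2
  have hq' : q ∈ pairsI cc rc := List.mem_of_mem_filter hq
  obtain ⟨pc, hpc, pr, hpr, rfl⟩ := (mem_pairsI cc rc p).mp hp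
  obtain ⟨qc, hqc, qr, hqr, rfl⟩ := (mem_pairsI cc rc q).mp hq'
  have hkf : keyFun cc rc ((pc : Int), (pr : Int)) ((qc : Int), (qr : Int)) = keyI cc rc pc pr qc qr := by
    unfold keyFun keyI
    rw [modInt_eq cc pc qc hcc hpc, modInt_eq rc pr qr hrc hpr]
  rw [hkf]
  refine ⟨(rc - (rc + qr - pr) % rc) % rc, Nat.mod_lt _ hrc,
    (cc - (cc + qc - pc) % cc) % cc, Nat.mod_lt _ hcc, ?_⟩
  unfold keyI keyOf
  rw [key_surj cc ((cc + qc - pc) % cc) hcc (Nat.mod_lt _ hcc),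
    key_surj rc ((rc + qr - pr) % rc) hrc (Nat.mod_lt _ hrc)]

-- ---- main equivalence ----
lemma main_eq (A B : List (List Int))
    (hrect : (A.headD []).length = 0 ∨ ∀ row ∈ A, row.length = (A.headD []).length) :
    largestOverlap1 A B = largestOverlap1_alt A B := by
  by_cases hA : A = []
  · subst hA
    simp [largestOverlap1, largestOverlap1_alt]
  · have hccpos : 0 < A.length := by
      cases A with
      | nil => exact absurd rfl hA
      | cons a t => simp
    rw [portA_eq A B hA hrect, portB_eq A B hA]
    by_cases hrc0 : (A.headD []).length = 0
    · rw [hrc0]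
      have hfk : flatKeys A B A.length 0 = [] := by
        unfold flatKeys pairsI
        simp
      rw [hfk]
      rw [show PySem.Set.ofList ([] : List (Int × Int)) = [] from rfl]
      rw [List.map_nil]
      rw [show PySem.List.max? ([] : List Int) (fun v => v) = none from
        (PySem.List.max?_eq_none_iff _ _).mpr rfl]
      rfl
    · have hrcpos : 0 < (A.headD []).length := by omega
      have hvalsLe : ∀ x ∈ outerVals A B A.length (A.headD []).length 0 0 (A.headD []).length,
          ∃ i < (A.headD []).length, ∃ k < A.length,
            x = (pCount A B A.length (A.headD []).length
              (keyOf A.length (A.headD []).length i k) : Int) := by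
        intro x hx
        rw [mem_outerVals] at hx
        obtain ⟨a, ha, j, hj, rfl⟩ := hx
        refine ⟨(0 + a + 1) % (A.headD []).length, Nat.mod_lt _ hrcpos,
          (0 + a * A.length + j + 1) % A.length, Nat.mod_lt _ hccpos, ?_⟩
        rw [nCount_mod, nCount_eq_pCount A B A.length (A.headD []).length hccpos hrcpos]
      have hBound : ∀ i, i < (A.headD []).length → ∀ k, k < A.length →
          (pCount A B A.length (A.headD []).length (keyOf A.length (A.headD []).length i k) : Int)
            ≤ List.foldl max 0 (outerVals A B A.length (A.headD []).length 0 0 (A.headD []).length) := by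
        intro i hi k hk
        have e1 : (0 + (i + (A.headD []).length - 1) % (A.headD []).length + 1)
            % (A.headD []).length = i := by
          rw [Nat.zero_add]
          exact succ_mod_pred (A.headD []).length i hrcpos hi
        have e2 : (0 + (i + (A.headD []).length - 1) % (A.headD []).length * A.length
            + (k + A.length - 1) % A.length + 1) % A.length = k := by
          rw [Nat.zero_add, show (i + (A.headD []).length - 1) % (A.headD []).length * A.length
              + (k + A.length - 1) % A.length + 1
              = ((k + A.length - 1) % A.length + 1)
                + (i + (A.headD []).length - 1) % (A.headD []).length * A.length from by ring,
            Nat.add_mul_mod_self_right]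
          exact succ_mod_pred A.length k hccpos hk
        have hmem : nCount A B A.length (A.headD []).length i k
            ∈ outerVals A B A.length (A.headD []).length 0 0 (A.headD []).length := by
          rw [mem_outerVals]
          refine ⟨(i + (A.headD []).length - 1) % (A.headD []).length, Nat.mod_lt _ hrcpos,
            (k + A.length - 1) % A.length, Nat.mod_lt _ hccpos, ?_⟩
          conv_rhs => rw [nCount_mod, e1, e2]
        have hle := (PySem.List.le_foldl_max
          (outerVals A B A.length (A.headD []).length 0 0 (A.headD []).length) 0).2 _ hmem
        rwa [nCount_eq_pCount A B A.length (A.headD []).length hccpos hrcpos i k] at hle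
      apply le_antisymm
      · cases hmax : PySem.List.max?
            ((PySem.Set.ofList (flatKeys A B A.length (A.headD []).length)).map
              (fun kk => (List.count kk (flatKeys A B A.length (A.headD []).length) : Int)))
            (fun v => v) with
        | none =>
          have hK : flatKeys A B A.length (A.headD []).length = [] := by
            by_contra hne
            obtain ⟨x, hx⟩ := List.exists_mem_of_ne_nil _ hne
            have h1 : x ∈ PySem.Set.ofList (flatKeys A B A.length (A.headD []).length) :=
              (PySem.Set.mem_ofList _ _).mpr hx
            have h2 := List.mem_map_of_mem
              (f := fun kk => (List.count kk (flatKeys A B A.length (A.headD []).length) : Int)) h1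
            rw [(PySem.List.max?_eq_none_iff _ _).mp hmax] at h2
            simp at h2
          rcases PySem.List.foldl_max_mem
              (outerVals A B A.length (A.headD []).length 0 0 (A.headD []).length) 0 with h0 | hmem
          · rw [h0]
          · obtain ⟨i, hi, k, hk, hx⟩ := hvalsLe _ hmem
            rw [hx, ← flatKeys_count A B A.length (A.headD []).length hccpos hrcpos, hK]
            simp
        | some v =>
          have hv0 : 0 ≤ v := by
            have hvmem := PySem.List.max?_mem hmax
            obtain ⟨kk, _, rfl⟩ := List.mem_map.mp hvmem
            exact Int.natCast_nonneg _
          rcases PySem.List.foldl_max_mem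
              (outerVals A B A.length (A.headD []).length 0 0 (A.headD []).length) 0 with h0 | hmem
          · rw [h0]
            exact hv0
          · obtain ⟨i, hi, k, hk, hx⟩ := hvalsLe _ hmem
            rw [hx]
            by_cases hz : pCount A B A.length (A.headD []).length
                (keyOf A.length (A.headD []).length i k) = 0
            · rw [hz]
              exact_mod_cast hv0
            · have hKmem : keyOf A.length (A.headD []).length i k
                  ∈ flatKeys A B A.length (A.headD []).length := by
                rw [← List.count_pos_iff,
                  flatKeys_count A B A.length (A.headD []).length hccpos hrcpos]
                omega
              have hmm : ((List.count (keyOf A.length (A.headD []).length i k)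
                    (flatKeys A B A.length (A.headD []).length) : Int))
                  ∈ (PySem.Set.ofList (flatKeys A B A.length (A.headD []).length)).map
                    (fun kk => (List.count kk (flatKeys A B A.length (A.headD []).length) : Int)) :=
                List.mem_map_of_mem ((PySem.Set.mem_ofList _ _).mpr hKmem)
              have hle := PySem.List.max?_isMax hmax _ hmm
              rw [← flatKeys_count A B A.length (A.headD []).length hccpos hrcpos]
              exact hle
      · cases hmax : PySem.List.max?
            ((PySem.Set.ofList (flatKeys A B A.length (A.headD []).length)).map
              (fun kk => (List.count kk (flatKeys A B A.length (A.headD []).length) : Int)))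
            (fun v => v) with
        | none =>
          exact (PySem.List.le_foldl_max _ 0).1
        | some v =>
          have hvmem := PySem.List.max?_mem hmax
          obtain ⟨kk, hkkset, rfl⟩ := List.mem_map.mp hvmem
          have hkk : kk ∈ flatKeys A B A.length (A.headD []).length :=
            (PySem.Set.mem_ofList _ _).mp hkkset
          obtain ⟨i, hi, k, hk, rfl⟩ := flatKeys_shape A B A.length (A.headD []).length
            hccpos hrcpos kk hkk
          rw [flatKeys_count A B A.length (A.headD []).length hccpos hrcpos]
          exact hBound i hi k hk

-- ===== VERDICT (by name: the statement is the Claim_ definition above) =====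
theorem largestOverlap1_spec : Claim_equal_largestOverlap1 := by
  intro A B _hDom hPre
  show largestOverlap1 A B = largestOverlap1_alt A B
  exact main_eq A B (hPre.imp (fun h => h) (fun h => h.1))
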